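-- pv_equiv track=rewrite | github.com/OmegaSun18/E0-259 | CommunityDetection/helper.py | number_of_shortest_paths
-- ===== SOURCE A (Python) =====
-- from collections import deque
--
-- def number_of_shortest_paths(root, adjlist):
--     #BFS to get the number of shortest paths from root to all other nodes
--     num_nodes = len(adjlist)
--     depth = [-1] * num_nodes
--     queue = deque()
--     queue.append(root)
--     shortest_paths = [0] * num_nodes
--     shortest_paths[root] = 1
--     depth[root] = 0
--     next_level = set()
--
--     while len(queue):
--         node = queue.popleft()
--         for child in adjlist[node]:
--             if depth[child] == -1:
--                 next_level.add(child)
--                 shortest_paths[child] += shortest_paths[node]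
--
--         if not len(queue):
--             for x in next_level:
--                 queue.append(x)
--                 depth[x] = depth[node] + 1
--
--             next_level.clear()
--
--     return shortest_paths, depth
-- ===== SOURCE B (Python) =====
-- def number_of_shortest_paths(root, adjlist):
--     # Two passes: (1) frontier-by-frontier BFS collecting each next frontier (with a
--     # membership check so a node is queued once per level) and labelling its depth when
--     # the level is complete, while recording visit order; (2) push shortest-path counts
--     # along every edge that goes down exactly one level.
--     n = len(adjlist)
--     depth = [-1] * n
--     depth[root] = 0
--     order = []
--     frontier = [root]
--     d = 0
--     while frontier:
--         order = order + frontier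
--         nxt = []
--         for node in frontier:
--             for c in adjlist[node]:
--                 if depth[c] == -1 and c not in nxt:
--                     nxt.append(c)
--         for x in nxt:
--             depth[x] = d + 1
--         frontier = nxt
--         d = d + 1
--     shortest_paths = [0] * n
--     shortest_paths[root] = 1
--     for node in order:
--         dn = depth[node]
--         for c in adjlist[node]:
--             if depth[c] == dn + 1:
--                 shortest_paths[c] += shortest_paths[node]
--     return shortest_paths, depth
-- ===== Notes on version B (the rewrite author's own statement) =====
-- stated objective: alternative
-- what changed: A interleaves path counting with a deque-plus-next_level-set BFS that defers depth labels until the queue drains; B is decomposed into two separate passes: a frontier-by-frontier BFS that collects each next frontier into a plain list (membership check instead of the set), labels its depths when the level is complete and records visit order, then a second push pass that adds shortest_paths[node] along every edge dropping exactly one level (no deque, no set, no flush-on-empty logic).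
import Mathlib
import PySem

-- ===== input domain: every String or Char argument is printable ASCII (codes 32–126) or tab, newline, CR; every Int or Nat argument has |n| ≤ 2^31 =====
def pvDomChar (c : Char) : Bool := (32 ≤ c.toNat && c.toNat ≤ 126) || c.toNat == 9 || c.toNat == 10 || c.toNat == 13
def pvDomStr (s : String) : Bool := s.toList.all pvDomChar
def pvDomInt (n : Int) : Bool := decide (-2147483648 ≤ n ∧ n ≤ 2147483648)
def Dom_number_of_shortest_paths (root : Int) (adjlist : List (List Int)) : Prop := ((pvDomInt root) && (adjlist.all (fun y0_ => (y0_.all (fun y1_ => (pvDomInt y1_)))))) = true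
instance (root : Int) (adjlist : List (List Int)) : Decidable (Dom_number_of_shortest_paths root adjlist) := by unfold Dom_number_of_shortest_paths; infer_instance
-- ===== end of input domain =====

-- B replaces A's single interleaved deque/next_level-set BFS by two separate passes
-- (a frontier-by-frontier BFS assigning depths, then a push pass for the path counts);
-- same cost.  A's iteration over the Python set next_level is ported in insertion order.

-- ===== PORT A =====
-- for child in adjlist[node]: if depth[child] == -1: next_level.add(child); shortest_paths[child] += shortest_paths[node]
def aChild (depth : List Int) (node : Int) (st : PySem.Set Int × List Int) (child : Int) :
    PySem.Set Int × List Int :=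
  if PySem.List.pyGetD depth child 0 = -1 then
    (PySem.Set.add st.1 child,
     PySem.List.pySetD st.2 child
       (PySem.List.pyGetD st.2 child 0 + PySem.List.pyGetD st.2 node 0))
  else st

def aNode (adjlist : List (List Int)) (depth : List Int) (st : PySem.Set Int × List Int)
    (node : Int) : PySem.Set Int × List Int :=
  (PySem.List.pyGetD adjlist node []).foldl (aChild depth node) st

-- for x in next_level: queue.append(x); depth[x] = depth[node] + 1
def aFlush (nextLevel : List Int) (node : Int) (depth : List Int) : List Int :=
  nextLevel.foldl (fun dp x => PySem.List.pySetD dp x (PySem.List.pyGetD dp node 0 + 1)) depth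

-- while len(queue): … (fuel makes the loop total; under Pre_ it never runs out)
def aLoop (adjlist : List (List Int)) :
    Nat → List Int → PySem.Set Int → List Int → List Int → List Int × List Int
  | 0, _, _, sp, depth => (sp, depth)
  | _ + 1, [], _, sp, depth => (sp, depth)
  | fuel + 1, node :: queue, nextLevel, sp, depth =>
      let st := aNode adjlist depth (nextLevel, sp) node
      if queue = [] then
        aLoop adjlist fuel st.1 PySem.Set.empty st.2 (aFlush st.1 node depth)
      else
        aLoop adjlist fuel queue st.1 st.2 depth

def number_of_shortest_paths (root : Int) (adjlist : List (List Int)) : List Int × List Int :=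
  let numNodes := adjlist.length
  let depth := PySem.List.pySetD (List.replicate numNodes (-1 : Int)) root 0
  let sp := PySem.List.pySetD (List.replicate numNodes (0 : Int)) root 1
  aLoop adjlist ((numNodes + 1) * (2 * numNodes + 2)) [root] PySem.Set.empty sp depth

-- ===== PORT B =====
-- pass 1 inner: if depth[c] == -1 and c not in nxt: nxt.append(c)
def bChild (depth : List Int) (nxt : List Int) (c : Int) : List Int :=
  if PySem.List.pyGetD depth c 0 = -1 ∧ c ∉ nxt then nxt ++ [c] else nxt

def bNode (adjlist : List (List Int)) (depth : List Int) (nxt : List Int) (node : Int) :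
    List Int :=
  (PySem.List.pyGetD adjlist node []).foldl (bChild depth) nxt

-- for x in nxt: depth[x] = d + 1
def bMark (d : Int) (nxt : List Int) (depth : List Int) : List Int :=
  nxt.foldl (fun dp x => PySem.List.pySetD dp x (d + 1)) depth

-- while frontier: … (fuel makes the loop total; under Pre_ it never runs out)
def bPass1 (adjlist : List (List Int)) :
    Nat → List Int → Int → List Int → List Int → List Int × List Int
  | 0, _, _, depth, order => (order, depth)
  | fuel + 1, frontier, d, depth, order =>
      if frontier = [] then (order, depth)
      else
        let nxt := frontier.foldl (bNode adjlist depth) []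
        bPass1 adjlist fuel nxt (d + 1) (bMark d nxt depth) (order ++ frontier)

-- pass 2 inner: if depth[c] == dn + 1: shortest_paths[c] += shortest_paths[node]
def bChild2 (depth : List Int) (node dn : Int) (sp : List Int) (c : Int) : List Int :=
  if PySem.List.pyGetD depth c 0 = dn + 1 then
    PySem.List.pySetD sp c (PySem.List.pyGetD sp c 0 + PySem.List.pyGetD sp node 0)
  else sp

def bNode2 (adjlist : List (List Int)) (depth : List Int) (sp : List Int) (node : Int) :
    List Int :=
  (PySem.List.pyGetD adjlist node []).foldl
    (bChild2 depth node (PySem.List.pyGetD depth node 0)) sp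

def bPass2 (adjlist : List (List Int)) (depth : List Int) (order : List Int) (sp : List Int) :
    List Int :=
  order.foldl (bNode2 adjlist depth) sp

def number_of_shortest_paths_alt (root : Int) (adjlist : List (List Int)) :
    List Int × List Int :=
  let n := adjlist.length
  let depth := PySem.List.pySetD (List.replicate n (-1 : Int)) root 0
  let p := bPass1 adjlist (n + 1) [root] 0 depth []
  let sp := PySem.List.pySetD (List.replicate n (0 : Int)) root 1
  (bPass2 adjlist p.2 p.1 sp, p.2)

-- ===== PRECONDITION & SPEC =====
-- the list cell a Python index x addresses (negative x wraps), as pyIdx? computes it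
def posN (n : Nat) (x : Int) : Nat := if 0 ≤ x then x.toNat else n - (-x).toNat
def pvInR (n : Nat) (c : Int) : Bool := decide (-(n : Int) ≤ c ∧ c < (n : Int))
def pvRowOK (n : Nat) (l : List Int) : Bool := l.all (pvInR n)
def pvNbrs (adjlist : List (List Int)) (j : Nat) : List Nat :=
  if pvRowOK adjlist.length (adjlist.getD j []) then
    (adjlist.getD j []).map (posN adjlist.length) else []
-- the cells reachable from the root through fully in-range rows (transitive closure of
-- the input's edge relation; a graph-shape condition on the input, not a run of A)
def pvReach (adjlist : List (List Int)) (root : Int) : List Nat :=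
  (fun S => PySem.Set.update S (S.flatMap (pvNbrs adjlist)))^[adjlist.length]
    [posN adjlist.length root]
-- Pre_ is exactly A's return domain: the root is an in-range index and every row the
-- BFS can reach is fully in-range; outside it A raises IndexError (an out-of-range
-- root, or an out-of-range neighbour in a reachable row, reached by depth[child]).
def Pre_number_of_shortest_paths (root : Int) (adjlist : List (List Int)) : Prop :=
  pvInR adjlist.length root = true ∧
    ∀ j ∈ pvReach adjlist root, pvRowOK adjlist.length (adjlist.getD j []) = true
instance (root : Int) (adjlist : List (List Int)) :
    Decidable (Pre_number_of_shortest_paths root adjlist) := by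
  unfold Pre_number_of_shortest_paths; infer_instance

def pvWitness_number_of_shortest_paths : Int × List (List Int) := (0, [[1, 2], [2], [1]])

def Spec_number_of_shortest_paths (root : Int) (adjlist : List (List Int))
    (out : List Int × List Int) : Prop := out = number_of_shortest_paths_alt root adjlist
instance (root : Int) (adjlist : List (List Int)) (out : List Int × List Int) :
    Decidable (Spec_number_of_shortest_paths root adjlist out) := by
  unfold Spec_number_of_shortest_paths; infer_instance

-- ===== CLAIM (what is proved, stated in full; the proofs are below) =====
def Claim_equal_number_of_shortest_paths : Prop :=
  ∀ (root : Int) (adjlist : List (List Int)), Dom_number_of_shortest_paths root adjlist →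
    Pre_number_of_shortest_paths root adjlist →
    Spec_number_of_shortest_paths root adjlist (number_of_shortest_paths root adjlist)

-- ===== LEMMAS AND PROOFS =====

-- number of still-undiscovered cells
def Fresh (xs : List Int) : Nat := xs.countP (fun z => decide (z = -1))

theorem pyIdx_in (n : Nat) (x : Int) (h1 : -(n : Int) ≤ x) (h2 : x < (n : Int)) :
    PySem.List.pyIdx? n x = some (posN n x) := by
  simp only [PySem.List.pyIdx?, posN]
  split_ifs <;> rfl

theorem pyIdx_out (n : Nat) (x : Int) (h : ¬(-(n : Int) ≤ x ∧ x < (n : Int))) :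
    PySem.List.pyIdx? n x = none := by
  simp only [PySem.List.pyIdx?]
  split_ifs <;> first | rfl | omega

theorem posN_lt (n : Nat) (x : Int) (h1 : -(n : Int) ≤ x) (h2 : x < (n : Int)) :
    posN n x < n := by
  unfold posN
  split_ifs <;> omega

theorem gpos (xs : List Int) (x : Int) (d : Int) (h1 : -(xs.length : Int) ≤ x)
    (h2 : x < (xs.length : Int)) :
    PySem.List.pyGetD xs x d = xs.getD (posN xs.length x) d := by
  simp only [PySem.List.pyGetD, PySem.List.pyGet?, pyIdx_in xs.length x h1 h2]
  show (xs[posN xs.length x]?).getD d = xs.getD (posN xs.length x) d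
  rw [List.getD_eq_getElem?_getD]

theorem gout (xs : List Int) (x : Int) (d : Int)
    (h : ¬(-(xs.length : Int) ≤ x ∧ x < (xs.length : Int))) :
    PySem.List.pyGetD xs x d = d := by
  simp only [PySem.List.pyGetD, PySem.List.pyGet?, pyIdx_out xs.length x h]
  rfl

theorem spos (xs : List Int) (x : Int) (v : Int) (h1 : -(xs.length : Int) ≤ x)
    (h2 : x < (xs.length : Int)) :
    PySem.List.pySetD xs x v = xs.set (posN xs.length x) v := by
  simp only [PySem.List.pySetD, PySem.List.pySet?, pyIdx_in xs.length x h1 h2,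
    Option.map_some, Option.getD_some]

theorem sout (xs : List Int) (x : Int) (v : Int)
    (h : ¬(-(xs.length : Int) ≤ x ∧ x < (xs.length : Int))) :
    PySem.List.pySetD xs x v = xs := by
  simp only [PySem.List.pySetD, PySem.List.pySet?, pyIdx_out xs.length x h,
    Option.map_none, Option.getD_none]

theorem gposn (n : Nat) (xs : List Int) (hl : xs.length = n) (x : Int) (d : Int)
    (h1 : -(n : Int) ≤ x) (h2 : x < (n : Int)) :
    PySem.List.pyGetD xs x d = xs.getD (posN n x) d := by
  subst hl
  exact gpos xs x d h1 h2

theorem sposn (n : Nat) (xs : List Int) (hl : xs.length = n) (x : Int) (v : Int)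
    (h1 : -(n : Int) ≤ x) (h2 : x < (n : Int)) :
    PySem.List.pySetD xs x v = xs.set (posN n x) v := by
  subst hl
  exact spos xs x v h1 h2

theorem fresh_inr (xs : List Int) (x : Int) (h : PySem.List.pyGetD xs x 0 = -1) :
    -(xs.length : Int) ≤ x ∧ x < (xs.length : Int) := by
  by_contra hc
  rw [gout xs x 0 hc] at h
  norm_num at h

theorem getD_set (xs : List Int) (p : Nat) (v : Int) (j : Nat) (hp : p < xs.length) :
    (xs.set p v).getD j 0 = if j = p then v else xs.getD j 0 := by
  by_cases hj : j < xs.length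
  · rw [List.getD_eq_getElem _ _ (by simpa using hj), List.getElem_set]
    split_ifs with h1 h2 h3 <;> first | omega | rfl | (rw [List.getD_eq_getElem _ _ hj])
  · rw [List.getD_eq_default _ _ (by simpa using hj), List.getD_eq_default _ _ (by omega)]
    split_ifs with h <;> omega

theorem Fresh_set (xs : List Int) (p : Nat) (v : Int) (hp : p < xs.length)
    (hx : xs.getD p 0 = -1) (hv : v ≠ -1) : Fresh (xs.set p v) + 1 = Fresh xs := by
  induction xs generalizing p with
  | nil => simp at hp
  | cons a l ih =>
    cases p with
    | zero => simp only [List.getD_cons_zero] at hx; simp [Fresh, List.set, hx, hv]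
    | succ p =>
      simp only [List.getD_cons_succ] at hx
      have := ih p (by simpa using hp) hx
      simp only [List.set, Fresh, List.countP_cons] at *; omega

theorem Fresh_set_eq (xs : List Int) (p : Nat) (v : Int)
    (hx : xs.getD p 0 ≠ -1) (hv : v ≠ -1) : Fresh (xs.set p v) = Fresh xs := by
  induction xs generalizing p with
  | nil => rfl
  | cons a l ih =>
    cases p with
    | zero => simp only [List.getD_cons_zero] at hx; simp [Fresh, List.set, hx, hv]
    | succ p =>
      simp only [List.getD_cons_succ] at hx
      have := ih p hx
      simp only [List.set, Fresh, List.countP_cons] at *; omega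

theorem Fresh_replicate (n : Nat) : Fresh (List.replicate n (-1 : Int)) = n := by
  induction n with
  | zero => rfl
  | succ n ih => simp [List.replicate_succ, Fresh] at *; omega

theorem Fresh_pySetD_le (xs : List Int) (x : Int) (v : Int) (hv : v ≠ -1) :
    Fresh (PySem.List.pySetD xs x v) ≤ Fresh xs := by
  by_cases h : -(xs.length : Int) ≤ x ∧ x < (xs.length : Int)
  · rw [spos xs x v h.1 h.2]
    by_cases hc : xs.getD (posN xs.length x) 0 = -1
    · have := Fresh_set xs (posN xs.length x) v (posN_lt _ _ h.1 h.2) hc hv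
      omega
    · rw [Fresh_set_eq xs _ v hc hv]
  · rw [sout xs x v h]

-- ----- coupling of A's next_level set with B's nxt list (depth is fixed in a level) -----

theorem couple_child (depth0 : List Int) (node c : Int) (S : PySem.Set Int)
    (sp nxt : List Int) (hS : S = nxt) :
    (aChild depth0 node (S, sp) c).1 = bChild depth0 nxt c := by
  subst hS
  unfold aChild bChild
  by_cases h : PySem.List.pyGetD depth0 c 0 = -1
  · rw [if_pos h]
    by_cases hm : c ∈ S
    · rw [if_neg (by simp [hm])]
      simp [PySem.Set.add, PySem.Set.contains, hm]
    · rw [if_pos ⟨h, hm⟩]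
      simp [PySem.Set.add, PySem.Set.contains, hm]
  · rw [if_neg h, if_neg (by simp [h])]

theorem couple_cs (depth0 : List Int) (node : Int) (cs : List Int) :
    ∀ (S : PySem.Set Int) (sp nxt : List Int), S = nxt →
      (cs.foldl (aChild depth0 node) (S, sp)).1 = cs.foldl (bChild depth0) nxt := by
  induction cs with
  | nil => intro S sp nxt hS; exact hS
  | cons c cs ih =>
    intro S sp nxt hS
    simp only [List.foldl_cons]
    have h1 := couple_child depth0 node c S sp nxt hS
    have hpair : aChild depth0 node (S, sp) c =
        ((aChild depth0 node (S, sp) c).1, (aChild depth0 node (S, sp) c).2) := rfl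
    rw [hpair]
    exact ih _ _ _ h1

theorem couple_q (adjlist : List (List Int)) (depth0 : List Int) (q : List Int) :
    ∀ (S : PySem.Set Int) (sp nxt : List Int), S = nxt →
      (q.foldl (aNode adjlist depth0) (S, sp)).1 = q.foldl (bNode adjlist depth0) nxt := by
  induction q with
  | nil => intro S sp nxt hS; exact hS
  | cons node q ih =>
    intro S sp nxt hS
    simp only [List.foldl_cons]
    have h1 := couple_cs depth0 node (PySem.List.pyGetD adjlist node []) S sp nxt hS
    have hpair : aNode adjlist depth0 (S, sp) node =
        ((aNode adjlist depth0 (S, sp) node).1, (aNode adjlist depth0 (S, sp) node).2) := rfl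
    rw [hpair]
    exact ih _ _ _ h1

-- ----- facts about the nxt list a level builds -----

theorem bChild_cases (depth0 : List Int) (nxt : List Int) (c : Int) :
    bChild depth0 nxt c = nxt ∨
      (bChild depth0 nxt c = nxt ++ [c] ∧ PySem.List.pyGetD depth0 c 0 = -1 ∧ c ∉ nxt) := by
  unfold bChild
  split_ifs with h
  · exact Or.inr ⟨rfl, h⟩
  · exact Or.inl rfl

theorem mono_cs (depth0 : List Int) (cs : List Int) :
    ∀ (nxt : List Int) (x : Int), x ∈ nxt → x ∈ cs.foldl (bChild depth0) nxt := by
  induction cs with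
  | nil => intro nxt x hx; exact hx
  | cons c cs ih =>
    intro nxt x hx
    simp only [List.foldl_cons]
    rcases bChild_cases depth0 nxt c with h | ⟨h, _, _⟩
    · rw [h]; exact ih _ _ hx
    · rw [h]; exact ih _ _ (List.mem_append.mpr (Or.inl hx))

theorem fresh_cs (depth0 : List Int) (cs : List Int) :
    ∀ (nxt : List Int), (∀ x ∈ nxt, PySem.List.pyGetD depth0 x 0 = -1) →
      ∀ x ∈ cs.foldl (bChild depth0) nxt, PySem.List.pyGetD depth0 x 0 = -1 := by
  induction cs with
  | nil => intro nxt h x hx; exact h x hx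
  | cons c cs ih =>
    intro nxt h
    simp only [List.foldl_cons]
    rcases bChild_cases depth0 nxt c with hc | ⟨hc, hfr, _⟩
    · rw [hc]; exact ih nxt h
    · rw [hc]
      refine ih _ ?_
      intro x hx
      rcases List.mem_append.mp hx with hx | hx
      · exact h x hx
      · simp at hx; rw [hx]; exact hfr

theorem nodup_cs (depth0 : List Int) (cs : List Int) :
    ∀ (nxt : List Int), nxt.Nodup → (cs.foldl (bChild depth0) nxt).Nodup := by
  induction cs with
  | nil => intro nxt h; exact h
  | cons c cs ih =>
    intro nxt h
    simp only [List.foldl_cons]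
    rcases bChild_cases depth0 nxt c with hc | ⟨hc, _, hnm⟩
    · rw [hc]; exact ih nxt h
    · rw [hc]
      refine ih _ ?_
      have hgoal : ∀ a ∈ nxt, ¬ a = c := fun a ha hac => hnm (hac ▸ ha)
      simp only [List.nodup_append, List.nodup_cons, List.not_mem_nil, not_false_eq_true,
        List.nodup_nil, and_true, true_and]
      refine ⟨h, ?_⟩
      simpa using hgoal

theorem cover_cs (depth0 : List Int) (cs : List Int) :
    ∀ (nxt : List Int), ∀ c ∈ cs, PySem.List.pyGetD depth0 c 0 = -1 →
      c ∈ cs.foldl (bChild depth0) nxt := by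
  induction cs with
  | nil => intro nxt c hc; simp at hc
  | cons c' cs ih =>
    intro nxt c hc hfr
    simp only [List.foldl_cons]
    rcases List.mem_cons.mp hc with hc | hc
    · rw [hc]
      by_cases hm : c' ∈ nxt
      · have hmem : c' ∈ bChild depth0 nxt c' := by
          rcases bChild_cases depth0 nxt c' with h | ⟨h, _, _⟩ <;> rw [h] <;> simp [hm]
        exact mono_cs depth0 cs _ c' hmem
      · have hstep : bChild depth0 nxt c' = nxt ++ [c'] := by
          unfold bChild
          rw [hc] at hfr
          rw [if_pos ⟨hfr, hm⟩]
        rw [hstep]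
        exact mono_cs depth0 cs _ c' (List.mem_append.mpr (Or.inr (by simp)))
    · exact ih _ c hc hfr

-- lifted to the whole-level fold over the queue
theorem mono_q (adjlist : List (List Int)) (depth0 : List Int) (q : List Int) :
    ∀ (nxt : List Int) (x : Int), x ∈ nxt → x ∈ q.foldl (bNode adjlist depth0) nxt := by
  induction q with
  | nil => intro nxt x hx; exact hx
  | cons node q ih =>
    intro nxt x hx
    simp only [List.foldl_cons]
    exact ih _ _ (mono_cs depth0 _ nxt x hx)

theorem fresh_q (adjlist : List (List Int)) (depth0 : List Int) (q : List Int) :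
    ∀ (nxt : List Int), (∀ x ∈ nxt, PySem.List.pyGetD depth0 x 0 = -1) →
      ∀ x ∈ q.foldl (bNode adjlist depth0) nxt, PySem.List.pyGetD depth0 x 0 = -1 := by
  induction q with
  | nil => intro nxt h x hx; exact h x hx
  | cons node q ih =>
    intro nxt h
    simp only [List.foldl_cons]
    exact ih _ (fresh_cs depth0 _ nxt h)

theorem nodup_q (adjlist : List (List Int)) (depth0 : List Int) (q : List Int) :
    ∀ (nxt : List Int), nxt.Nodup → (q.foldl (bNode adjlist depth0) nxt).Nodup := by
  induction q with
  | nil => intro nxt h; exact h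
  | cons node q ih =>
    intro nxt h
    simp only [List.foldl_cons]
    exact ih _ (nodup_cs depth0 _ nxt h)

theorem cover_q (adjlist : List (List Int)) (depth0 : List Int) (q : List Int) :
    ∀ (nxt : List Int), ∀ node ∈ q, ∀ c ∈ PySem.List.pyGetD adjlist node [],
      PySem.List.pyGetD depth0 c 0 = -1 → c ∈ q.foldl (bNode adjlist depth0) nxt := by
  induction q with
  | nil => intro nxt node hn; simp at hn
  | cons node' q ih =>
    intro nxt node hn c hc hfr
    simp only [List.foldl_cons]
    rcases List.mem_cons.mp hn with hn | hn
    · rw [hn] at hc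
      exact mono_q adjlist depth0 q _ c (cover_cs depth0 _ nxt c hc hfr)
    · exact ih _ node hn c hc hfr

-- ----- the end-of-level marking -----

theorem mark_len (d : Int) (nxt : List Int) :
    ∀ dp : List Int, (bMark d nxt dp).length = dp.length := by
  induction nxt with
  | nil => intro dp; rfl
  | cons x xs ih =>
    intro dp
    show (bMark d xs (PySem.List.pySetD dp x (d + 1))).length = dp.length
    rw [ih, PySem.List.length_pySetD]

theorem mark_get (n : Nat) (d : Int) (nxt : List Int)
    (hIR : ∀ x ∈ nxt, -(n : Int) ≤ x ∧ x < (n : Int)) :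
    ∀ dp : List Int, dp.length = n → ∀ j : Nat, j < n →
      (bMark d nxt dp).getD j 0 =
        if ∃ x ∈ nxt, posN n x = j then d + 1 else dp.getD j 0 := by
  induction nxt with
  | nil => intro dp _ j _; rw [if_neg (by simp)]; rfl
  | cons x xs ih =>
    intro dp hl j hj
    have hx := hIR x List.mem_cons_self
    have hset : PySem.List.pySetD dp x (d + 1) = dp.set (posN n x) (d + 1) :=
      sposn n dp hl x (d + 1) (by omega) (by omega)
    show (bMark d xs (PySem.List.pySetD dp x (d + 1))).getD j 0 = _
    rw [hset]
    rw [ih (fun y hy => hIR y (List.mem_cons_of_mem _ hy)) _ (by simp [hl]) j hj]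
    rw [getD_set dp (posN n x) (d + 1) j (by rw [hl]; exact posN_lt n x hx.1 hx.2)]
    by_cases hxs : ∃ y ∈ xs, posN n y = j
    · rw [if_pos hxs, if_pos ⟨hxs.choose, List.mem_cons_of_mem _ hxs.choose_spec.1,
        hxs.choose_spec.2⟩]
    · rw [if_neg hxs]
      by_cases he : j = posN n x
      · rw [if_pos he, if_pos ⟨x, List.mem_cons_self, he.symm⟩]
      · rw [if_neg he, if_neg ?_]
        rintro ⟨y, hy, hyj⟩
        rcases List.mem_cons.mp hy with hy | hy
        · rw [hy] at hyj; exact he hyj.symm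
        · exact hxs ⟨y, hy, hyj⟩

theorem mark_Fresh_le (d : Int) (hd : 0 ≤ d) (nxt : List Int) :
    ∀ dp : List Int, Fresh (bMark d nxt dp) ≤ Fresh dp := by
  induction nxt with
  | nil => intro dp; exact le_refl _
  | cons x xs ih =>
    intro dp
    show Fresh (bMark d xs (PySem.List.pySetD dp x (d + 1))) ≤ Fresh dp
    calc Fresh (bMark d xs (PySem.List.pySetD dp x (d + 1)))
        ≤ Fresh (PySem.List.pySetD dp x (d + 1)) := ih _
      _ ≤ Fresh dp := Fresh_pySetD_le dp x (d + 1) (by omega)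

theorem mark_Fresh_lt (d : Int) (hd : 0 ≤ d) (x : Int) (xs : List Int) (dp : List Int)
    (hx : PySem.List.pyGetD dp x 0 = -1) :
    Fresh (bMark d (x :: xs) dp) < Fresh dp := by
  have hr := fresh_inr dp x hx
  rw [gpos dp x 0 hr.1 hr.2] at hx
  have hstep := Fresh_set dp (posN dp.length x) (d + 1) (posN_lt _ _ hr.1 hr.2) hx (by omega)
  show Fresh (bMark d xs (PySem.List.pySetD dp x (d + 1))) < Fresh dp
  rw [spos dp x (d + 1) hr.1 hr.2]
  have := mark_Fresh_le d hd xs (dp.set (posN dp.length x) (d + 1))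
  omega

theorem nodup_len_le (n : Nat) (l : List Int) (hnd : l.Nodup)
    (hIR : ∀ x ∈ l, -(n : Int) ≤ x ∧ x < (n : Int)) : l.length ≤ 2 * n := by
  have hmap : (l.map (fun x : Int => (x + (n : Int)).toNat)).Nodup := by
    refine List.Nodup.map_on ?_ hnd
    intro x hx y hy hxy
    have h1 := hIR x hx
    have h2 := hIR y hy
    omega
  have hlt : ∀ y ∈ l.map (fun x : Int => (x + (n : Int)).toNat), y < 2 * n := by
    intro y hy
    rcases List.mem_map.mp hy with ⟨x, hx, hxy⟩
    have := hIR x hx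
    omega
  have hsub : (l.map (fun x : Int => (x + (n : Int)).toNat)).toFinset ⊆ Finset.range (2 * n) := by
    intro y hy
    rw [List.mem_toFinset] at hy
    exact Finset.mem_range.mpr (hlt y hy)
  have := Finset.card_le_card hsub
  rw [List.toFinset_card_of_nodup hmap, Finset.card_range] at this
  simpa using this

-- ----- A's flush equals B's marking -----

theorem aFlush_eq (n : Nat) (d node : Int) (depth0 : List Int)
    (hnd : depth0.getD (posN n node) 0 = d) (hd : 0 ≤ d)
    (hnode : -(n : Int) ≤ node ∧ node < (n : Int)) (nxt : List Int)
    (hnxt : ∀ x ∈ nxt, (-(n : Int) ≤ x ∧ x < (n : Int)) ∧ depth0.getD (posN n x) 0 = -1) :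
    ∀ dp : List Int, dp.length = n → dp.getD (posN n node) 0 = d →
      aFlush nxt node dp = bMark d nxt dp := by
  induction nxt with
  | nil => intro dp _ _; rfl
  | cons x xs ih =>
    intro dp hl hdn
    have hx := hnxt x List.mem_cons_self
    have hval : PySem.List.pyGetD dp node 0 = d := by
      rw [gpos dp node 0 (by omega) (by omega)]
      rw [hl]; exact hdn
    show aFlush xs node (PySem.List.pySetD dp x (PySem.List.pyGetD dp node 0 + 1)) =
      bMark d xs (PySem.List.pySetD dp x (d + 1))
    rw [hval]
    refine ih (fun y hy => hnxt y (List.mem_cons_of_mem _ hy)) _ ?_ ?_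
    · rw [PySem.List.length_pySetD]; exact hl
    · rw [sposn n dp hl x (d + 1) (by omega) (by omega)]
      rw [getD_set dp (posN n x) (d + 1) _ (by rw [hl]; exact posN_lt n x hx.1.1 hx.1.2)]
      rw [if_neg ?_]
      · exact hdn
      · intro he
        rw [← he] at hx
        have h2 := hx.2
        rw [hnd] at h2
        omega

-- ----- pass 2: the sp component -----

theorem sp_proj (depth0 : List Int) (node : Int) (cs : List Int) :
    ∀ (S : PySem.Set Int) (sp : List Int),
      (cs.foldl (aChild depth0 node) (S, sp)).2 =
        cs.foldl (fun sp c =>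
          if PySem.List.pyGetD depth0 c 0 = -1 then
            PySem.List.pySetD sp c
              (PySem.List.pyGetD sp c 0 + PySem.List.pyGetD sp node 0)
          else sp) sp := by
  induction cs with
  | nil => intro S sp; rfl
  | cons c cs ih =>
    intro S sp
    simp only [List.foldl_cons]
    unfold aChild
    split_ifs with h <;> exact ih _ _

theorem sp_congr (depth0 depthF : List Int) (d node : Int)
    (hnode : PySem.List.pyGetD depthF node 0 = d) (cs : List Int)
    (hcs : ∀ c ∈ cs, (PySem.List.pyGetD depth0 c 0 = -1 ↔ PySem.List.pyGetD depthF c 0 = d + 1)) :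
    ∀ sp : List Int,
      cs.foldl (fun sp c =>
        if PySem.List.pyGetD depth0 c 0 = -1 then
          PySem.List.pySetD sp c
            (PySem.List.pyGetD sp c 0 + PySem.List.pyGetD sp node 0)
        else sp) sp
      = cs.foldl (bChild2 depthF node (PySem.List.pyGetD depthF node 0)) sp := by
  induction cs with
  | nil => intro sp; rfl
  | cons c cs ih =>
    intro sp
    simp only [List.foldl_cons]
    have hc := hcs c List.mem_cons_self
    have ih' := ih (fun x hx => hcs x (List.mem_cons_of_mem _ hx))
    have hstep : bChild2 depthF node (PySem.List.pyGetD depthF node 0) sp c =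
        (if PySem.List.pyGetD depth0 c 0 = -1 then
          PySem.List.pySetD sp c
            (PySem.List.pyGetD sp c 0 + PySem.List.pyGetD sp node 0)
        else sp) := by
      unfold bChild2
      rw [hnode]
      by_cases h : PySem.List.pyGetD depth0 c 0 = -1
      · rw [if_pos h, if_pos (hc.mp h)]
      · rw [if_neg h, if_neg (fun hf => h (hc.mpr hf))]
    rw [hstep]
    exact ih' _

theorem spq (adjlist : List (List Int)) (depth0 depthF : List Int) (d : Int) (q : List Int)
    (hq : ∀ node ∈ q, PySem.List.pyGetD depthF node 0 = d ∧
      ∀ c ∈ PySem.List.pyGetD adjlist node [],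
        (PySem.List.pyGetD depth0 c 0 = -1 ↔ PySem.List.pyGetD depthF c 0 = d + 1)) :
    ∀ (S : PySem.Set Int) (sp : List Int),
      (q.foldl (aNode adjlist depth0) (S, sp)).2 = bPass2 adjlist depthF q sp := by
  induction q with
  | nil => intro S sp; rfl
  | cons node q ih =>
    intro S sp
    have hn := hq node List.mem_cons_self
    simp only [List.foldl_cons, bPass2] at *
    have hstep : (aNode adjlist depth0 (S, sp) node).2 = bNode2 adjlist depthF sp node := by
      unfold aNode bNode2
      rw [sp_proj, sp_congr depth0 depthF d node hn.1 _ hn.2]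
    have hpair : aNode adjlist depth0 (S, sp) node =
        ((aNode adjlist depth0 (S, sp) node).1, (aNode adjlist depth0 (S, sp) node).2) := rfl
    rw [hpair, hstep]
    exact ih (fun x hx => hq x (List.mem_cons_of_mem _ hx)) _ _

-- ----- bPass1 only labels fresh cells -----

theorem bPass1_pres (adjlist : List (List Int)) :
    ∀ (fuel : Nat) (q : List Int) (d : Int) (depth order : List Int), 0 ≤ d →
      depth.length = adjlist.length →
      ((bPass1 adjlist fuel q d depth order).2).length = adjlist.length ∧
      ∀ j : Nat, j < adjlist.length → depth.getD j 0 ≠ -1 →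
        ((bPass1 adjlist fuel q d depth order).2).getD j 0 = depth.getD j 0 := by
  intro fuel
  induction fuel with
  | zero => intro q d depth order _ hl; exact ⟨hl, fun _ _ _ => rfl⟩
  | succ fuel ih =>
    intro q d depth order hd hl
    by_cases hqe : q = []
    · rw [show bPass1 adjlist (fuel + 1) q d depth order = (order, depth) from by
        simp [bPass1, hqe]]
      exact ⟨hl, fun _ _ _ => rfl⟩
    · simp only [bPass1, if_neg hqe]
      set nxt := q.foldl (bNode adjlist depth) [] with hnxt
      have hfr : ∀ x ∈ nxt, PySem.List.pyGetD depth x 0 = -1 :=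
        fresh_q adjlist depth q [] (by simp)
      have hIR : ∀ x ∈ nxt, -(adjlist.length : Int) ≤ x ∧ x < (adjlist.length : Int) := by
        intro x hx
        have := fresh_inr depth x (hfr x hx)
        rw [hl] at this
        exact this
      have hmg := mark_get adjlist.length d nxt hIR depth hl
      have hml : (bMark d nxt depth).length = adjlist.length := by
        rw [mark_len]; exact hl
      obtain ⟨g1, g2⟩ := ih nxt (d + 1) (bMark d nxt depth) (order ++ q) (by omega) hml
      refine ⟨g1, ?_⟩
      intro j hj hne
      have hpm : (bMark d nxt depth).getD j 0 = depth.getD j 0 := by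
        rw [hmg j hj, if_neg ?_]
        rintro ⟨x, hx, hxj⟩
        have := hfr x hx
        rw [gposn adjlist.length depth hl x 0 (hIR x hx).1 (hIR x hx).2] at this
        rw [hxj] at this
        exact hne this
      rw [g2 j hj (by rw [hpm]; exact hne), hpm]

-- ----- order accumulator and A's level unfolding -----

theorem bPass1_acc (adjlist : List (List Int)) :
    ∀ (fuel : Nat) (q : List Int) (d : Int) (depth order : List Int),
      bPass1 adjlist fuel q d depth order =
        (order ++ (bPass1 adjlist fuel q d depth []).1,
         (bPass1 adjlist fuel q d depth []).2) := by
  intro fuel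
  induction fuel with
  | zero => intro q d depth order; simp [bPass1]
  | succ fuel ih =>
    intro q d depth order
    by_cases hqe : q = []
    · simp [bPass1, hqe]
    · simp only [bPass1, if_neg hqe]
      rw [ih _ _ _ (order ++ q), ih _ _ _ ([] ++ q)]
      simp

theorem aLoop_level (adjlist : List (List Int)) :
    ∀ (q : List Int), q ≠ [] → ∀ (fuel : Nat) (S : PySem.Set Int) (sp depth : List Int),
      aLoop adjlist (fuel + q.length) q S sp depth =
        aLoop adjlist fuel (q.foldl (aNode adjlist depth) (S, sp)).1 PySem.Set.empty
          (q.foldl (aNode adjlist depth) (S, sp)).2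
          (aFlush (q.foldl (aNode adjlist depth) (S, sp)).1 (q.getLastD 0) depth) := by
  intro q
  induction q with
  | nil => intro h; exact absurd rfl h
  | cons node q ih =>
    intro _ fuel S sp depth
    by_cases hqe : q = []
    · subst hqe
      rfl
    · have : fuel + (node :: q).length = (fuel + q.length) + 1 := by simp; omega
      rw [this]
      show aLoop adjlist ((fuel + q.length) + 1) (node :: q) S sp depth = _
      simp only [aLoop, if_neg hqe]
      rw [ih hqe fuel _ _ depth]
      simp only [List.foldl_cons]
      have : (node :: q).getLastD 0 = q.getLastD 0 := by
        rw [List.getLastD_cons]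
        cases q with
        | nil => exact absurd rfl hqe
        | cons a l => rw [List.getLastD_cons, List.getLastD_cons]
      rw [this]

theorem getLastD_mem (q : List Int) (h : q ≠ []) : q.getLastD 0 ∈ q := by
  cases q with
  | nil => exact absurd rfl h
  | cons a l => rw [List.getLastD_cons]; exact List.getLastD_mem_cons

-- ----- main simulation -----

theorem main_sim (adjlist : List (List Int)) :
    ∀ (fA : Nat) (fB : Nat) (d : Int) (q depth sp : List Int), 0 ≤ d →
      depth.length = adjlist.length →
      (∀ x ∈ q, (-(adjlist.length : Int) ≤ x ∧ x < (adjlist.length : Int)) ∧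
        depth.getD (posN adjlist.length x) 0 = d) →
      (∀ j : Nat, j < adjlist.length → depth.getD j 0 ≤ d) →
      q.length ≤ 2 * adjlist.length →
      (Fresh depth + 1) * (2 * adjlist.length + 2) ≤ fA →
      Fresh depth + 2 ≤ fB →
      aLoop adjlist fA q PySem.Set.empty sp depth =
        (bPass2 adjlist (bPass1 adjlist fB q d depth []).2
          (bPass1 adjlist fB q d depth []).1 sp,
         (bPass1 adjlist fB q d depth []).2) := by
  intro fA
  induction fA using Nat.strong_induction_on with
  | _ fA ih =>
    intro fB d q depth sp hd hl hq hbound hql hfA hfB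
    have hn2 : 2 * adjlist.length + 2 ≤ fA := by
      have h1 : 1 * (2 * adjlist.length + 2) ≤ (Fresh depth + 1) * (2 * adjlist.length + 2) :=
        Nat.mul_le_mul_right _ (by omega)
      omega
    obtain ⟨fB', rfl⟩ : ∃ fB', fB = fB' + 1 := ⟨fB - 1, by omega⟩
    by_cases hqe : q = []
    · subst hqe
      obtain ⟨fA', rfl⟩ : ∃ fA', fA = fA' + 1 := ⟨fA - 1, by omega⟩
      simp [bPass1, aLoop, bPass2]
    · set n := adjlist.length with hn
      set nxt := q.foldl (bNode adjlist depth) [] with hnxtdef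
      set depth1 := bMark d nxt depth with hdepth1
      set stA := q.foldl (aNode adjlist depth) (PySem.Set.empty, sp) with hstA
      have couple : stA.1 = nxt := couple_q adjlist depth q PySem.Set.empty sp [] rfl
      have hfr : ∀ x ∈ nxt, PySem.List.pyGetD depth x 0 = -1 :=
        fresh_q adjlist depth q [] (by simp)
      have hIR : ∀ x ∈ nxt, -(n : Int) ≤ x ∧ x < (n : Int) := by
        intro x hx
        have := fresh_inr depth x (hfr x hx)
        rw [hl] at this
        exact this
      have hfrD : ∀ x ∈ nxt, depth.getD (posN n x) 0 = -1 := by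
        intro x hx
        have := hfr x hx
        rwa [gposn n depth hl x 0 (hIR x hx).1 (hIR x hx).2] at this
      have hnd : nxt.Nodup := nodup_q adjlist depth q [] (by simp)
      have hmg := mark_get n d nxt hIR depth hl
      have hml : depth1.length = n := by rw [hdepth1, mark_len]; exact hl
      -- A: drain the level
      obtain ⟨fA', hfA'⟩ : ∃ fA', fA = fA' + q.length := ⟨fA - q.length, by omega⟩
      have hqlen1 : 1 ≤ q.length := by
        rcases List.exists_cons_of_ne_nil hqe with ⟨y, ys, hys⟩
        rw [hys]; simp
      rw [hfA', aLoop_level adjlist q hqe fA', ← hstA]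
      have hlast := hq (q.getLastD 0) (getLastD_mem q hqe)
      have hflush : aFlush stA.1 (q.getLastD 0) depth = depth1 := by
        rw [couple, hdepth1]
        exact aFlush_eq n d (q.getLastD 0) depth hlast.2 hd hlast.1 nxt
          (fun x hx => ⟨hIR x hx, hfrD x hx⟩) depth hl hlast.2
      rw [hflush, couple]
      -- B: one pass-1 round
      set R := bPass1 adjlist fB' nxt (d + 1) depth1 [] with hR
      have hB1 : bPass1 adjlist (fB' + 1) q d depth [] = (q ++ R.1, R.2) := by
        simp only [bPass1, if_neg hqe]
        rw [bPass1_acc adjlist fB' _ _ _ ([] ++ q)]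
        simp only [List.nil_append]
        exact Prod.ext rfl rfl
      rw [hB1]
      obtain ⟨p1, p2⟩ := bPass1_pres adjlist fB' nxt (d + 1) depth1 [] (by omega) hml
      rw [← hR] at p1 p2
      -- level facts used by pass 2
      have hd1 : ∀ x ∈ nxt, depth1.getD (posN n x) 0 = d + 1 := by
        intro x hx
        rw [hdepth1, hmg (posN n x) (posN_lt n x (hIR x hx).1 (hIR x hx).2)]
        rw [if_pos ⟨x, hx, rfl⟩]
      have hpres1 : ∀ j : Nat, j < n → depth.getD j 0 ≠ -1 →
          depth1.getD j 0 = depth.getD j 0 := by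
        intro j hj hne
        rw [hdepth1, hmg j hj, if_neg ?_]
        rintro ⟨x, hx, hxj⟩
        rw [← hxj] at hne
        exact hne (hfrD x hx)
      have hconds : ∀ node ∈ q, PySem.List.pyGetD R.2 node 0 = d ∧
          ∀ c ∈ PySem.List.pyGetD adjlist node [],
            (PySem.List.pyGetD depth c 0 = -1 ↔ PySem.List.pyGetD R.2 c 0 = d + 1) := by
        intro node hnode
        obtain ⟨hnr, hnv⟩ := hq node hnode
        have hpn := posN_lt n node hnr.1 hnr.2
        have hd1n : depth1.getD (posN n node) 0 = d := by
          rw [hpres1 _ hpn (by rw [hnv]; omega)]; exact hnv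
        constructor
        · rw [gpos R.2 node 0 (by rw [p1]; exact hnr.1) (by rw [p1]; exact hnr.2), p1]
          rw [p2 _ hpn (by rw [hd1n]; omega)]
          exact hd1n
        · intro c hc
          constructor
          · intro hfresh
            have hcm : c ∈ nxt := cover_q adjlist depth q [] node hnode c hc hfresh
            have hcr := hIR c hcm
            rw [gpos R.2 c 0 (by rw [p1]; exact hcr.1) (by rw [p1]; exact hcr.2), p1]
            rw [p2 _ (posN_lt n c hcr.1 hcr.2) (by rw [hd1 c hcm]; omega)]
            exact hd1 c hcm
          · intro hRc
            by_contra hfresh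
            by_cases hcr : -(n : Int) ≤ c ∧ c < (n : Int)
            · have hgc : PySem.List.pyGetD depth c 0 = depth.getD (posN n c) 0 :=
                gposn n depth hl c 0 hcr.1 hcr.2
              have hne : depth.getD (posN n c) 0 ≠ -1 := by rw [← hgc]; exact hfresh
              have hpc := posN_lt n c hcr.1 hcr.2
              have h1 : depth1.getD (posN n c) 0 = depth.getD (posN n c) 0 := hpres1 _ hpc hne
              have h2 : PySem.List.pyGetD R.2 c 0 = depth.getD (posN n c) 0 := by
                rw [gpos R.2 c 0 (by rw [p1]; exact hcr.1) (by rw [p1]; exact hcr.2), p1]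
                rw [p2 _ hpc (by rw [h1]; exact hne), h1]
              have := hbound (posN n c) hpc
              rw [h2] at hRc
              omega
            · rw [gout R.2 c 0 (by rw [p1]; exact fun hh => hcr hh)] at hRc
              omega
      -- A's sp after the level = pass 2 over this level's nodes
      have hsp : stA.2 = bPass2 adjlist R.2 q sp :=
        spq adjlist depth R.2 d q hconds PySem.Set.empty sp
      have hsplit : bPass2 adjlist R.2 (q ++ R.1) sp =
          bPass2 adjlist R.2 R.1 (bPass2 adjlist R.2 q sp) := by
        unfold bPass2; rw [List.foldl_append]
      rw [hsplit, ← hsp]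
      by_cases hne : nxt = []
      · obtain ⟨fA'', rfl⟩ : ∃ fA'', fA' = fA'' + 1 := ⟨fA' - 1, by omega⟩
        have hRval : R = ([], depth1) := by
          rw [hR, hne]
          obtain ⟨fB'', rfl⟩ : ∃ fB'', fB' = fB'' + 1 := ⟨fB' - 1, by omega⟩
          simp [bPass1]
        rw [hne, hRval]
        simp only [aLoop, bPass2, List.foldl_nil]
      · -- recurse on the next level
        rcases List.exists_cons_of_ne_nil hne with ⟨y, ys, hys⟩
        have hflt : Fresh depth1 < Fresh depth := by
          rw [hdepth1, hys]
          exact mark_Fresh_lt d hd y ys depth (hfr y (by rw [hys]; simp))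
        have hq1 : ∀ x ∈ nxt, (-(n : Int) ≤ x ∧ x < (n : Int)) ∧
            depth1.getD (posN n x) 0 = d + 1 :=
          fun x hx => ⟨hIR x hx, hd1 x hx⟩
        have hbound1 : ∀ j : Nat, j < n → depth1.getD j 0 ≤ d + 1 := by
          intro j hj
          rw [hdepth1, hmg j hj]
          split_ifs with h
          · omega
          · have := hbound j hj; omega
        have hql1 : nxt.length ≤ 2 * n := nodup_len_le n nxt hnd hIR
        have hfA1 : (Fresh depth1 + 1) * (2 * n + 2) ≤ fA' := by
          have h1 : (Fresh depth1 + 1) * (2 * n + 2) ≤ Fresh depth * (2 * n + 2) :=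
            Nat.mul_le_mul_right _ (by omega)
          have h2 : (Fresh depth + 1) * (2 * n + 2) =
              Fresh depth * (2 * n + 2) + (2 * n + 2) := by ring
          omega
        exact ih fA' (by omega) fB' (d + 1) nxt depth1 stA.2 (by omega) hml hq1 hbound1
          hql1 hfA1 (by omega)

-- ===== VERDICT (by name: the statement is the Claim_ definition above) =====
theorem number_of_shortest_paths_spec : Claim_equal_number_of_shortest_paths := by
  intro root adjlist _hdom hpre
  obtain ⟨hroot, _⟩ := hpre
  rw [pvInR, decide_eq_true_eq] at hroot
  unfold Spec_number_of_shortest_paths number_of_shortest_paths number_of_shortest_paths_alt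
  simp only []
  have hn : 1 ≤ adjlist.length := by omega
  have hpr := posN_lt adjlist.length root hroot.1 hroot.2
  set depth0 := PySem.List.pySetD (List.replicate adjlist.length (-1 : Int)) root 0
    with hdepth0
  have hd0 : depth0 = (List.replicate adjlist.length (-1 : Int)).set
      (posN adjlist.length root) 0 := by
    rw [hdepth0, spos _ root 0 (by simpa using hroot.1) (by simpa using hroot.2)]
    simp
  have hlen0 : depth0.length = adjlist.length := by rw [hd0]; simp
  have hget : ∀ j : Nat, j < adjlist.length →
      depth0.getD j 0 = if j = posN adjlist.length root then 0 else -1 := by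
    intro j hj
    rw [hd0, getD_set _ _ _ _ (by simpa using hpr)]
    split_ifs with he
    · rfl
    · rw [List.getD_eq_getElem _ _ (by simpa using hj)]; simp
  have hfresh : Fresh depth0 = adjlist.length - 1 := by
    have h1 := Fresh_set (List.replicate adjlist.length (-1 : Int))
      (posN adjlist.length root) 0 (by simpa using hpr)
      (by rw [List.getD_eq_getElem _ _ (by simpa using hpr)]; simp) (by omega)
    have h2 := Fresh_replicate adjlist.length
    rw [← hd0] at h1
    omega
  have hq0 : ∀ x ∈ [root], (-(adjlist.length : Int) ≤ x ∧ x < (adjlist.length : Int)) ∧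
      depth0.getD (posN adjlist.length x) 0 = 0 := by
    intro x hx
    simp only [List.mem_singleton] at hx
    rw [hx]
    refine ⟨hroot, ?_⟩
    rw [hget _ hpr]; simp
  have hb0 : ∀ j : Nat, j < adjlist.length → depth0.getD j 0 ≤ 0 := by
    intro j hj
    rw [hget j hj]
    split_ifs <;> omega
  have hfa0 : (Fresh depth0 + 1) * (2 * adjlist.length + 2) ≤
      (adjlist.length + 1) * (2 * adjlist.length + 2) :=
    Nat.mul_le_mul_right _ (by omega)
  exact main_sim adjlist ((adjlist.length + 1) * (2 * adjlist.length + 2))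
    (adjlist.length + 1) 0 [root] depth0
    (PySem.List.pySetD (List.replicate adjlist.length (0 : Int)) root 1)
    le_rfl hlen0 hq0 hb0 (by simp; omega) hfa0 (by omega)
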